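-- pv_equiv track=rewrite | github.com/pypi-data/pypi-mirror-149 | packages/labanotation/labanotation-0.1.4-py3-none-any.whl/labanotation/pose_utils.py | extract_target_pid_indices
-- ===== SOURCE A (Python) =====
-- def extract_target_pid_indices(results_poses, pid):
--     n_frame = len(results_poses)
--     start_index = None
--     for i in range(n_frame):
--         results = results_poses[i]
--         for res in results:
--             if pid == res['pid']:
--                 start_index = i
--                 break
--         if start_index is not None:
--             break
--     if start_index is None:
--         return None
--
--     end_index = None
--     for i in range(n_frame - 1, -1, -1):
--         results = results_poses[i]
--         for res in results:
--             if pid == res['pid']: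
--                 end_index = i + 1
--                 break
--         if end_index:
--             break
--     return range(start_index, end_index)
-- ===== SOURCE B (Python) =====
-- def extract_target_pid_indices(results_poses, pid):
--     indices = [i for i, results in enumerate(results_poses)
--                if any(res.get('pid') == pid for res in results)]
--     if not indices:
--         return None
--     return range(indices[0], indices[-1] + 1)
-- ===== Notes on version B (the rewrite author's own statement) =====
-- stated objective: simpler
-- what changed: A's two opposite-direction early-exit scans (forward for the first matching frame, backward for the last) are replaced by one forward enumerate pass that collects every matching frame index via res.get('pid') and reads the first and last entry of that list; B matches A's value on every input on which A returns.
import Mathlib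
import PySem

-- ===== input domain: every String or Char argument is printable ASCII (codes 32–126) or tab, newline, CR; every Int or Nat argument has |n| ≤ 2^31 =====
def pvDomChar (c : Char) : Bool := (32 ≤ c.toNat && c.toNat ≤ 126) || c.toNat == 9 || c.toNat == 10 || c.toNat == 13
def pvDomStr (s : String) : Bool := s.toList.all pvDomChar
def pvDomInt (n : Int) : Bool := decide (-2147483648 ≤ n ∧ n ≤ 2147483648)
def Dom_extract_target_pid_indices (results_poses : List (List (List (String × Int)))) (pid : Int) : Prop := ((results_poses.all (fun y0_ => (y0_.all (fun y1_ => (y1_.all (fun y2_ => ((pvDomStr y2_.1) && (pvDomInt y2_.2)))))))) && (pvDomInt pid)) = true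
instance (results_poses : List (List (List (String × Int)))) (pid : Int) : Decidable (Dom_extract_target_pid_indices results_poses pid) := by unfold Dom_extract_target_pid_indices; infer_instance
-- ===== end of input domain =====

-- B replaces A's two opposite-direction early-exit scans with one enumerate pass using
-- dict .get, so it returns wherever A does (objective: simpler); A's KeyErrors are outside Pre_.

-- ===== PORT A =====
-- res['pid'] lookup: on a dict without key "pid" Python raises KeyError; the port's `== some pid`
-- test is false there — exactly the inputs where A raises are excluded by Pre_ below.
def pvA_hit (pid : Int) (results : List (List (String × Int))) : Bool :=
  results.any (fun res => List.lookup "pid" res == some pid)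

-- forward loop: first i with a matching frame (break on first hit)
def pvA_start : List (List (List (String × Int))) → Int → Int → Option Int
  | [], _, _ => none
  | f :: rest, pid, i => if pvA_hit pid f then some i else pvA_start rest pid (i + 1)

-- backward loop over range(n_frame-1, -1, -1): results_poses[i] is a getD on the absolute index
def pvA_end (rp : List (List (List (String × Int)))) (pid : Int) : Nat → Option Int
  | 0 => none
  | Nat.succ i => if pvA_hit pid (rp.getD i []) then some ((i : Int) + 1) else pvA_end rp pid i

def extract_target_pid_indices (results_poses : List (List (List (String × Int)))) (pid : Int) : Option (List Int) :=
  match pvA_start results_poses pid 0 with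
  | none => none
  | some s =>
    match pvA_end results_poses pid results_poses.length with
    | none => none
    | some e => some (PySem.List.pyRange s e 1)

-- ===== PORT B =====
-- res.get('pid') == pid: a missing key compares unequal (lookup = none ≠ some pid), never raises
def extract_target_pid_indices_alt (results_poses : List (List (List (String × Int)))) (pid : Int) : Option (List Int) :=
  let indices := (PySem.List.enumerate results_poses 0).filterMap
      (fun p => if p.2.any (fun res => List.lookup "pid" res == some pid) then some p.1 else none)
  match indices with
  | [] => none
  | x :: rest => some (PySem.List.pyRange x ((x :: rest).getLast (List.cons_ne_nil x rest) + 1) 1)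

-- ===== PRECONDITION & SPEC =====
-- every dict scanned before the frame's first matching dict carries the key "pid"
def pvOkFrame (f : List (List (String × Int))) (pid : Int) : Bool :=
  (f.takeWhile (fun d => List.lookup "pid" d != some pid)).all
    (fun d => (List.lookup "pid" d).isSome)

-- A's forward scan reaches no missing-"pid" dict: frames before the first matching frame are
-- scanned in full (all keys present), and the first matching frame is ok up to its first match
def pvFwdOK (rp : List (List (List (String × Int)))) (pid : Int) : Bool :=
  ((rp.takeWhile (fun f => !(pvA_hit pid f))).all
      (fun f => f.all (fun d => (List.lookup "pid" d).isSome))) &&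
  (match rp.dropWhile (fun f => !(pvA_hit pid f)) with
    | [] => true
    | f :: _ => pvOkFrame f pid)

-- Pre_ holds exactly where Python A returns normally: A raises KeyError iff its forward scan
-- (or, symmetrically, its backward scan = forward scan of the reversed list) reaches a dict
-- without the key "pid" before breaking.
def Pre_extract_target_pid_indices (results_poses : List (List (List (String × Int)))) (pid : Int) : Prop :=
  (pvFwdOK results_poses pid && pvFwdOK results_poses.reverse pid) = true
instance (results_poses : List (List (List (String × Int)))) (pid : Int) : Decidable (Pre_extract_target_pid_indices results_poses pid) := by unfold Pre_extract_target_pid_indices; infer_instance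

def pvWitness_extract_target_pid_indices : (List (List (List (String × Int)))) × Int :=
  ([[[("pid", 2)]], [], [[("pid", 2)], [("pid", 0)]]], 2)

def Spec_extract_target_pid_indices (results_poses : List (List (List (String × Int)))) (pid : Int) (out : Option (List Int)) : Prop := out = extract_target_pid_indices_alt results_poses pid
instance (results_poses : List (List (List (String × Int)))) (pid : Int) (out : Option (List Int)) : Decidable (Spec_extract_target_pid_indices results_poses pid out) := by unfold Spec_extract_target_pid_indices; infer_instance

-- ===== CLAIM (what is proved, stated in full; the proofs are below) =====
def Claim_equal_extract_target_pid_indices : Prop := ∀ (results_poses : List (List (List (String × Int)))) (pid : Int), Dom_extract_target_pid_indices results_poses pid → Pre_extract_target_pid_indices results_poses pid → Spec_extract_target_pid_indices results_poses pid (extract_target_pid_indices results_poses pid)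


-- ===== LEMMAS AND PROOFS =====
-- the list of matching frame indices built by B, starting the enumeration at s
def pvIdx (pid : Int) (rp : List (List (List (String × Int)))) (s : Int) : List Int :=
  (PySem.List.enumerate rp s).filterMap (fun p => if pvA_hit pid p.2 then some p.1 else none)

theorem pvIdx_nil (pid : Int) (s : Int) : pvIdx pid [] s = [] := rfl

theorem pvIdx_cons (pid : Int) (f : List (List (String × Int))) (rp : List (List (List (String × Int)))) (s : Int) :
    pvIdx pid (f :: rp) s = (if pvA_hit pid f then [s] else []) ++ pvIdx pid rp (s + 1) := by
  simp only [pvIdx, PySem.List.enumerate_cons, List.filterMap_cons]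
  split <;> simp_all

theorem pvIdx_append (pid : Int) (xs ys : List (List (List (String × Int)))) (s : Int) :
    pvIdx pid (xs ++ ys) s = pvIdx pid xs s ++ pvIdx pid ys (s + xs.length) := by
  simp [pvIdx, PySem.List.enumerate_append]

theorem pvA_start_eq (pid : Int) (rp : List (List (List (String × Int)))) (s : Int) :
    pvA_start rp pid s = (pvIdx pid rp s).head? := by
  induction rp generalizing s with
  | nil => rfl
  | cons f rest ih =>
    rw [pvIdx_cons]
    by_cases h : pvA_hit pid f <;> simp [pvA_start, h, ih]

theorem pvA_end_stable (pid : Int) (ys : List (List (List (String × Int)))) (f : List (List (String × Int))) :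
    ∀ m, m ≤ ys.length → pvA_end (ys ++ [f]) pid m = pvA_end ys pid m := by
  intro m
  induction m with
  | zero => intro _; rfl
  | succ i ih =>
    intro h
    have hi : i < ys.length := h
    simp only [pvA_end, ih (Nat.le_of_lt hi), List.getD]
    rw [List.getElem?_append_left hi]
    rfl

theorem pvA_end_eq (pid : Int) (rp : List (List (List (String × Int)))) :
    pvA_end rp pid rp.length = (pvIdx pid rp 0).getLast?.map (· + 1) := by
  induction rp using List.reverseRecOn with
  | nil => rfl
  | append_singleton ys f ih =>
    have hlen : (ys ++ [f]).length = ys.length + 1 := by simp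
    rw [hlen]
    have hget : (ys ++ [f]).getD ys.length [] = f := by
      rw [List.getD, List.getElem?_append_right (Nat.le_refl ys.length)]
      simp
    by_cases h : pvA_hit pid f
    · simp [pvA_end, hget, h, pvIdx_append, pvIdx_cons, pvIdx_nil]
    · simp only [pvA_end, hget, h]
      rw [pvA_end_stable pid ys f ys.length (Nat.le_refl _), ih,
        pvIdx_append, pvIdx_cons]
      simp [h, pvIdx_nil]

-- ===== VERDICT (by name: the statement is the Claim_ definition above) =====
theorem extract_target_pid_indices_spec : Claim_equal_extract_target_pid_indices := by
  intro rp pid _ _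
  show extract_target_pid_indices rp pid = extract_target_pid_indices_alt rp pid
  unfold extract_target_pid_indices extract_target_pid_indices_alt
  rw [pvA_start_eq, pvA_end_eq]
  show _ = (match pvIdx pid rp 0 with
    | [] => none
    | x :: rest => some (PySem.List.pyRange x ((x :: rest).getLast (List.cons_ne_nil x rest) + 1) 1))
  cases hL : pvIdx pid rp 0 with
  | nil => rfl
  | cons x rest =>
    simp [List.getLast?_eq_some_getLast]
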